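-- pv_equiv track=rewrite | github.com/luzhiyuan25/echoscene | scripts/eval_3dfront.py | _build_enc_index_map
-- ===== SOURCE A (Python) =====
-- def _build_enc_index_map(dec_len, missing_nodes):
--     missing_nodes_sorted = sorted([int(x) for x in missing_nodes])
--     mapping = {}
--     num_missing_before = 0
--     miss_ptr = 0
--     for dec_idx in range(dec_len):
--         while miss_ptr < len(missing_nodes_sorted) and missing_nodes_sorted[miss_ptr] < dec_idx:
--             num_missing_before += 1
--             miss_ptr += 1
--         if miss_ptr < len(missing_nodes_sorted) and missing_nodes_sorted[miss_ptr] == dec_idx: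
--             continue
--         mapping[dec_idx] = dec_idx - num_missing_before
--     return mapping
-- ===== SOURCE B (Python) =====
-- def _build_enc_index_map(dec_len, missing_nodes):
--     s = sorted(int(x) for x in missing_nodes)
--     present = set(s)
--
--     def bisect_left(a, x):
--         lo, hi = 0, len(a)
--         while lo < hi:
--             mid = (lo + hi) // 2
--             if a[mid] < x:
--                 lo = mid + 1
--             else:
--                 hi = mid
--         return lo
--
--     return {i: i - bisect_left(s, i) for i in range(dec_len) if i not in present}
-- ===== Notes on version B (the rewrite author's own statement) =====
-- stated objective: alternative
-- what changed: Replaces A's stateful two-pointer merge (incremental miss_ptr/num_missing_before carried across the loop) by a stateless dict comprehension: a set for the skip test and a per-index hand-written binary search (bisect_left) into the sorted missing list, which counts duplicates correctly.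
import Mathlib
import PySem

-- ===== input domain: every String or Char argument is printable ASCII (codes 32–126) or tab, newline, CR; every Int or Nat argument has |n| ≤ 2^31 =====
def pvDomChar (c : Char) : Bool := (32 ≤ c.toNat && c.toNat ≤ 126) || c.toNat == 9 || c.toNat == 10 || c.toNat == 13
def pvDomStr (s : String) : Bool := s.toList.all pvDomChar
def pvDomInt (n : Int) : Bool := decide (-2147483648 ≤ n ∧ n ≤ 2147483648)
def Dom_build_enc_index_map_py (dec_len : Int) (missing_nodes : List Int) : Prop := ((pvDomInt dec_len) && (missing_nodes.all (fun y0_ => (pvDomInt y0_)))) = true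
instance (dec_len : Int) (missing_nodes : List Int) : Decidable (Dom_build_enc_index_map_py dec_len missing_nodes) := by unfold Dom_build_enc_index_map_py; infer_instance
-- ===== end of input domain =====

-- B replaces A's stateful two-pointer merge by a stateless comprehension: set membership for
-- skipping and a hand-written bisect_left (binary search) into the sorted missing list
-- (objective: alternative decomposition, same exact result).

-- ===== PORT A =====
-- the inner 'while miss_ptr < len(...) and ...[miss_ptr] < dec_idx' loop; the pointer is
-- represented by the remaining suffix of the sorted list (ptr advance = dropping the head)
def pvAWhile (i : Int) : Int → List Int → Int × List Int
  | n, [] => (n, [])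
  | n, h :: t => if h < i then pvAWhile i (n + 1) t else (n, h :: t)

-- one iteration of A's 'for dec_idx in range(dec_len)' body; state = (mapping, num_missing_before, suffix)
def pvStepA (st : PySem.Dict Int Int × Int × List Int) (i : Int) : PySem.Dict Int Int × Int × List Int :=
  match pvAWhile i st.2.1 st.2.2 with
  | (n', hd :: tl) => if hd = i then (st.1, n', hd :: tl) else (st.1.insert i (i - n'), n', hd :: tl)
  | (n', []) => (st.1.insert i (i - n'), n', [])

def build_enc_index_map_py (dec_len : Int) (missing_nodes : List Int) : List (Int × Int) :=
  let s := PySem.List.sorted missing_nodes (fun x => x)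
  (((PySem.List.pyRange 0 dec_len 1).foldl pvStepA
      ((PySem.Dict.empty : PySem.Dict Int Int), (0 : Int), s)).1).items

-- ===== PORT B =====
-- Source B's hand-written bisect_left loop: while lo < hi: mid = (lo+hi)//2; ...
def pvBisectLoop (a : List Int) (x : Int) (lo hi : Nat) : Nat :=
  if h : lo < hi then
    let mid := (lo + hi) / 2
    if a.getD mid 0 < x then pvBisectLoop a x (mid + 1) hi
    else pvBisectLoop a x lo mid
  else lo
termination_by hi - lo
decreasing_by all_goals omega

-- the dict-comprehension body
def pvStepB (s : List Int) (present : PySem.Set Int) (d : PySem.Dict Int Int) (i : Int) : PySem.Dict Int Int :=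
  if present.contains i then d else d.insert i (i - (pvBisectLoop s i 0 s.length : Int))

def build_enc_index_map_py_alt (dec_len : Int) (missing_nodes : List Int) : List (Int × Int) :=
  let s := PySem.List.sorted missing_nodes (fun x => x)
  let present := PySem.Set.ofList s
  ((PySem.List.pyRange 0 dec_len 1).foldl (pvStepB s present)
      (PySem.Dict.empty : PySem.Dict Int Int)).items

-- ===== PRECONDITION & SPEC =====
def Spec_build_enc_index_map_py (dec_len : Int) (missing_nodes : List Int) (out : List (Int × Int)) : Prop := out = build_enc_index_map_py_alt dec_len missing_nodes
instance (dec_len : Int) (missing_nodes : List Int) (out : List (Int × Int)) : Decidable (Spec_build_enc_index_map_py dec_len missing_nodes out) := by unfold Spec_build_enc_index_map_py; infer_instance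

-- ===== CLAIM (what is proved, stated in full; the proofs are below) =====
def Claim_equal_build_enc_index_map_py : Prop := ∀ (dec_len : Int) (missing_nodes : List Int), Dom_build_enc_index_map_py dec_len missing_nodes → Spec_build_enc_index_map_py dec_len missing_nodes (build_enc_index_map_py dec_len missing_nodes)

-- ===== LEMMAS AND PROOFS =====

-- A's while loop = take/drop of the elements below i
theorem pvAWhile_eq (i : Int) : ∀ (n : Int) (rem : List Int),
    pvAWhile i n rem
      = (n + ((rem.takeWhile (fun x => decide (x < i))).length : Int),
         rem.dropWhile (fun x => decide (x < i))) := by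
  intro n rem
  induction rem generalizing n with
  | nil => simp [pvAWhile]
  | cons h t ih =>
    by_cases hh : h < i
    · simp [pvAWhile, hh, ih]; ring
    · simp [pvAWhile, hh]

-- a count determined by a positional boundary
theorem countP_eq_boundary (P : Int → Bool) :
    ∀ (a : List Int) (r : Nat), r ≤ a.length →
      (∀ j (hj : j < a.length), j < r → P a[j] = true) →
      (∀ j (hj : j < a.length), r ≤ j → P a[j] = false) →
      a.countP P = r := by
  intro a
  induction a with
  | nil => intro r hr _ _; simp at hr; simp [hr]
  | cons h t ih =>
    intro r hr h1 h2
    cases r with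
    | zero =>
      have hz : ∀ x ∈ h :: t, ¬ P x = true := by
        intro x hx
        obtain ⟨j, hj, rfl⟩ := List.mem_iff_getElem.mp hx
        simp [h2 j hj (Nat.zero_le j)]
      exact List.countP_eq_zero.mpr hz
    | succ r' =>
      have hP : P h = true := h1 0 (by simp) (Nat.succ_pos r')
      have : t.countP P = r' := by
        apply ih r' (by simpa using hr)
        · intro j hj hjr
          have := h1 (j + 1) (by simpa using hj) (by omega)
          simpa using this
        · intro j hj hjr
          have := h2 (j + 1) (by simpa using hj) (by omega)
          simpa using this
      simp [hP, this]

-- correctness of Source B's binary search on a sorted list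
theorem pvBisect_spec (a : List Int) (x : Int) (hs : a.Pairwise (· ≤ ·)) :
    ∀ (k lo hi : Nat), hi - lo = k → lo ≤ hi → hi ≤ a.length →
      (∀ j (hj : j < a.length), j < lo → a[j] < x) →
      (∀ j (hj : j < a.length), hi ≤ j → ¬ a[j] < x) →
      pvBisectLoop a x lo hi = a.countP (fun y => decide (y < x)) := by
  have mono : ∀ p q (hq : q < a.length) (hpq : p ≤ q), a[p]'(by omega) ≤ a[q] := by
    intro p q hq hpq
    rcases Nat.lt_or_ge p q with h | h
    · exact (List.pairwise_iff_getElem.mp hs) p q (by omega) hq h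
    · have : p = q := by omega
      subst this; exact le_refl _
  intro k
  induction k using Nat.strong_induction_on with
  | _ k ihk =>
    intro lo hi hk hlohi hhi h1 h2
    unfold pvBisectLoop
    split
    case isTrue hlt =>
      have hmid1 : lo ≤ (lo + hi) / 2 := by omega
      have hmid2 : (lo + hi) / 2 < hi := by omega
      have hmlen : (lo + hi) / 2 < a.length := by omega
      have hget : a.getD ((lo + hi) / 2) 0 = a[(lo + hi) / 2] := List.getD_eq_getElem a 0 hmlen
      show (if a.getD ((lo + hi) / 2) 0 < x then pvBisectLoop a x ((lo + hi) / 2 + 1) hi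
            else pvBisectLoop a x lo ((lo + hi) / 2)) = List.countP (fun y => decide (y < x)) a
      split
      case isTrue hx =>
        refine ihk (hi - ((lo + hi) / 2 + 1)) (by omega) _ _ rfl (by omega) hhi ?_ h2
        intro j hj hjm
        have : a[j] ≤ a[(lo + hi) / 2] := mono j _ hmlen (by omega)
        calc a[j] ≤ a[(lo + hi) / 2] := this
          _ < x := by rwa [hget] at hx
      case isFalse hx =>
        refine ihk ((lo + hi) / 2 - lo) (by omega) _ _ rfl (by omega) (by omega) h1 ?_
        intro j hj hjm
        have hle : a[(lo + hi) / 2] ≤ a[j] := mono _ j hj hjm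
        rw [hget] at hx
        omega
    case isFalse hlt =>
      have : lo = hi := by omega
      subst this
      exact (countP_eq_boundary _ a lo hhi (by intro j hj hjr; simpa using h1 j hj hjr)
        (by intro j hj hjr; simpa using decide_eq_false (h2 j hj hjr))).symm

-- all elements surviving dropWhile (< i) in a sorted list are ≥ i
theorem dropWhile_ge (i : Int) : ∀ (rem : List Int), rem.Pairwise (· ≤ ·) →
    ∀ y ∈ rem.dropWhile (fun x => decide (x < i)), ¬ y < i := by
  intro rem
  induction rem with
  | nil => simp
  | cons h t ih =>
    intro hp y hy
    rcases List.pairwise_cons.mp hp with ⟨hht, hpt⟩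
    by_cases hh : h < i
    · exact ih hpt y (by simpa [List.dropWhile_cons, hh] using hy)
    · rw [List.dropWhile_cons] at hy
      simp only [hh, decide_false] at hy
      rcases (List.mem_cons.mp hy) with rfl | hyt
      · exact hh
      · have := hht y hyt; omega

-- the invariant carried by A's fold: s = p ++ rem, num_missing_before = |p|, every dropped element < a
theorem main_fold (s : List Int) (hs : s.Pairwise (· ≤ ·)) :
    ∀ (n : Nat) (a b : Int) (p rem : List Int) (d : PySem.Dict Int Int),
      (b - a).toNat = n → s = p ++ rem → (∀ x ∈ p, x < a) →
      ((PySem.List.pyRange a b 1).foldl pvStepA (d, (p.length : Int), rem)).1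
        = (PySem.List.pyRange a b 1).foldl (pvStepB s (PySem.Set.ofList s)) d := by
  intro n
  induction n with
  | zero =>
    intro a b p rem d hn _ _
    rw [PySem.List.pyRange_one_eq_nil (by omega)]
    simp
  | succ m ih =>
    intro a b p rem d hn hsplit hlt
    have hab : a < b := by omega
    rw [PySem.List.pyRange_one_cons hab]
    simp only [List.foldl_cons]
    have hrem : rem.takeWhile (fun x => decide (x < a)) ++ rem.dropWhile (fun x => decide (x < a)) = rem :=
      List.takeWhile_append_dropWhile
    set tw := rem.takeWhile (fun x => decide (x < a)) with htw
    set dw := rem.dropWhile (fun x => decide (x < a)) with hdw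
    have hsplit' : s = (p ++ tw) ++ dw := by rw [List.append_assoc, hrem]; exact hsplit
    have hptw : ∀ x ∈ p ++ tw, x < a := by
      intro x hx
      rcases List.mem_append.mp hx with h | h
      · exact hlt x h
      · have := List.mem_takeWhile_imp h
        simpa using this
    have hremsorted : rem.Pairwise (· ≤ ·) := (List.pairwise_append.mp (hsplit ▸ hs)).2.1
    have hdwge : ∀ y ∈ dw, ¬ y < a := dropWhile_ge a rem hremsorted
    have hdwsorted : dw.Pairwise (· ≤ ·) := hremsorted.sublist (List.dropWhile_sublist _)
    have hcount : s.countP (fun y => decide (y < a)) = (p ++ tw).length := by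
      rw [hsplit', List.countP_append]
      rw [List.countP_eq_length.mpr (by intro x hx; simpa using hptw x hx)]
      rw [List.countP_eq_zero.mpr (by intro x hx; simpa using hdwge x hx)]
      omega
    have hbl : pvBisectLoop s a 0 s.length = (p ++ tw).length := by
      rw [pvBisect_spec s a hs (s.length - 0) 0 s.length rfl (Nat.zero_le _) le_rfl
        (by intro j hj hh; omega) (by intro j hj hh; omega)]
      exact hcount
    have hwhile : pvAWhile a (p.length : Int) rem = (((p ++ tw).length : Int), dw) := by
      rw [pvAWhile_eq a (p.length : Int) rem]
      simp [← htw, ← hdw]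
    have hinv2 : ∀ x ∈ p ++ tw, x < a + 1 := fun x hx => by have := hptw x hx; omega
    have hn' : (b - (a + 1)).toNat = m := by omega
    cases hdwc : dw with
    | nil =>
      have hmem : a ∉ s := by
        intro hmem
        rw [hsplit', hdwc, List.append_nil] at hmem
        exact absurd (hptw a hmem) (lt_irrefl a)
      have hA : pvStepA (d, (p.length : Int), rem) a
          = (d.insert a (a - ((p ++ tw).length : Int)), ((p ++ tw).length : Int), ([] : List Int)) := by
        simp only [pvStepA, hwhile, hdwc]
      have hB : pvStepB s (PySem.Set.ofList s) d a
          = d.insert a (a - ((p ++ tw).length : Int)) := by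
        simp only [pvStepB, hbl]
        rw [if_neg (by simpa [PySem.Set.contains, List.contains_eq_mem, PySem.Set.mem_ofList] using hmem)]
      rw [hA, hB]
      exact ih (a + 1) b (p ++ tw) [] _ hn' (by rw [hsplit', hdwc, List.append_nil]) hinv2
    | cons hd tl =>
      have hhd : ¬ hd < a := hdwge hd (by rw [hdwc]; exact List.mem_cons_self)
      by_cases hhda : hd = a
      · have hmem : a ∈ s := by
          rw [hsplit', hdwc, ← hhda]
          exact List.mem_append_right _ List.mem_cons_self
        have hA : pvStepA (d, (p.length : Int), rem) a
            = (d, ((p ++ tw).length : Int), hd :: tl) := by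
          simp only [pvStepA, hwhile, hdwc]
          rw [if_pos hhda]
        have hB : pvStepB s (PySem.Set.ofList s) d a = d := by
          simp only [pvStepB]
          rw [if_pos (by simpa [PySem.Set.contains, List.contains_eq_mem, PySem.Set.mem_ofList] using hmem)]
        rw [hA, hB]
        exact ih (a + 1) b (p ++ tw) (hd :: tl) _ hn' (by rw [hsplit', hdwc]) hinv2
      · have hmem : a ∉ s := by
          intro hmem
          rw [hsplit'] at hmem
          rcases List.mem_append.mp hmem with h | h
          · exact absurd (hptw a h) (lt_irrefl a)
          · rw [hdwc] at h
            rcases List.mem_cons.mp h with h | h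
            · exact hhda h.symm
            · have h1 : hd ≤ a := (List.pairwise_cons.mp (hdwc ▸ hdwsorted)).1 a h
              omega
        have hA : pvStepA (d, (p.length : Int), rem) a
            = (d.insert a (a - ((p ++ tw).length : Int)), ((p ++ tw).length : Int), hd :: tl) := by
          simp only [pvStepA, hwhile, hdwc]
          rw [if_neg hhda]
        have hB : pvStepB s (PySem.Set.ofList s) d a
            = d.insert a (a - ((p ++ tw).length : Int)) := by
          simp only [pvStepB, hbl]
          rw [if_neg (by simpa [PySem.Set.contains, List.contains_eq_mem, PySem.Set.mem_ofList] using hmem)]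
        rw [hA, hB]
        exact ih (a + 1) b (p ++ tw) (hd :: tl) _ hn' (by rw [hsplit', hdwc]) hinv2

-- ===== VERDICT (by name: the statement is the Claim_ definition above) =====
theorem build_enc_index_map_py_spec : Claim_equal_build_enc_index_map_py := by
  intro dec_len missing_nodes _
  unfold Spec_build_enc_index_map_py build_enc_index_map_py build_enc_index_map_py_alt
  have hs : (PySem.List.sorted missing_nodes (fun x => x)).Pairwise (· ≤ ·) :=
    PySem.List.sorted_pairwise missing_nodes (fun x => x)
  have := main_fold (PySem.List.sorted missing_nodes (fun x => x)) hs
    (dec_len - 0).toNat 0 dec_len [] (PySem.List.sorted missing_nodes (fun x => x))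
    PySem.Dict.empty rfl rfl (by simp)
  simpa using congrArg PySem.Dict.items this
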